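-- pv_equiv track=rewrite | github.com/EDA-Teaching-RJH/assignment-foundations-of-programming-CrystalW1nds | fleet_manager.py | calculate_payroll
-- ===== SOURCE A (Python) =====
-- def calculate_payroll(ranks):
--     payroll = 0
--     for i in range(len(ranks)):
--         if ranks[i] == "Commodore" or ranks[i] == "Rear Admiral" or ranks[i] == "Vice Admiral":
--             payroll = payroll + 2000
--
--         elif ranks[i] == "Commander" or ranks[i] == "Captain":
--             payroll = payroll + 1000
--
--         elif ranks[i] == "Ensign" or ranks[i] == "Lieutenant":
--             payroll = payroll + 500
--
--         elif ranks[i] == "Crewman Third Class" or ranks[i] == "Crewman Second Class" or ranks[i] == "Crewman First Class":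
--             payroll = payroll + 200
--
--     return(payroll)
-- ===== SOURCE B (Python) =====
-- SALARIES = {
--     "Commodore": 2000, "Rear Admiral": 2000, "Vice Admiral": 2000,
--     "Commander": 1000, "Captain": 1000,
--     "Ensign": 500, "Lieutenant": 500,
--     "Crewman Third Class": 200, "Crewman Second Class": 200, "Crewman First Class": 200,
-- }
--
-- def calculate_payroll(ranks):
--     counts = {}
--     for r in ranks:
--         counts[r] = counts.get(r, 0) + 1
--     return sum(s * counts.get(r, 0) for r, s in SALARIES.items())
-- ===== Notes on version B (the rewrite author's own statement) =====
-- stated objective: alternative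
-- what changed: Replaces the per-element elif chain inside the loop by a frequency table built in one pass over ranks, then one sum over a fixed salary table of salary * count, so unknown ranks contribute nothing without any branch chain.
import Mathlib
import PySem

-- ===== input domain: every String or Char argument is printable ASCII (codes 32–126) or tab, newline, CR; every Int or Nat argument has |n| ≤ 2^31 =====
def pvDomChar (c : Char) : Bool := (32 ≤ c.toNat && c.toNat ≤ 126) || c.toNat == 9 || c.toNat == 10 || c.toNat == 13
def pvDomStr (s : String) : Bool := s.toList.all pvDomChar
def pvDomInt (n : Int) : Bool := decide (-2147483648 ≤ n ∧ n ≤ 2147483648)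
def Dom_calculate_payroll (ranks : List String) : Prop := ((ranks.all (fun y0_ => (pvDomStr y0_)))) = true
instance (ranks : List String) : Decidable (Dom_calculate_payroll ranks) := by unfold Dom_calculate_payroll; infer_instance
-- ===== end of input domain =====

-- B replaces the per-element elif chain by a one-pass frequency dict plus a sum over a fixed salary table (alternative decomposition, same cost).

-- ===== PORT A =====
-- literal port: for i in range(len(ranks)): elif chain accumulating payroll (ranks[i] always in range)
def calculate_payroll (ranks : List String) : Int :=
  (PySem.List.pyRange 0 (PySem.List.len ranks) 1).foldl
    (fun payroll i =>
      if PySem.List.pyGetD ranks i "" = "Commodore" ∨ PySem.List.pyGetD ranks i "" = "Rear Admiral" ∨ PySem.List.pyGetD ranks i "" = "Vice Admiral" then payroll + 2000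
      else if PySem.List.pyGetD ranks i "" = "Commander" ∨ PySem.List.pyGetD ranks i "" = "Captain" then payroll + 1000
      else if PySem.List.pyGetD ranks i "" = "Ensign" ∨ PySem.List.pyGetD ranks i "" = "Lieutenant" then payroll + 500
      else if PySem.List.pyGetD ranks i "" = "Crewman Third Class" ∨ PySem.List.pyGetD ranks i "" = "Crewman Second Class" ∨ PySem.List.pyGetD ranks i "" = "Crewman First Class" then payroll + 200
      else payroll) 0

-- ===== PORT B =====
-- the module-level SALARIES dict of Source B
def pvSalaries : PySem.Dict String Int :=
  PySem.Dict.ofList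
    [("Commodore", 2000), ("Rear Admiral", 2000), ("Vice Admiral", 2000),
     ("Commander", 1000), ("Captain", 1000),
     ("Ensign", 500), ("Lieutenant", 500),
     ("Crewman Third Class", 200), ("Crewman Second Class", 200), ("Crewman First Class", 200)]

def calculate_payroll_alt (ranks : List String) : Int :=
  let counts := ranks.foldl (fun d r => d.insert r (d.getD r 0 + 1)) PySem.Dict.empty
  (pvSalaries.items.map (fun p => p.2 * counts.getD p.1 0)).sum

-- ===== PRECONDITION & SPEC =====
def Spec_calculate_payroll (ranks : List String) (out : Int) : Prop := out = calculate_payroll_alt ranks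
instance (ranks : List String) (out : Int) : Decidable (Spec_calculate_payroll ranks out) := by unfold Spec_calculate_payroll; infer_instance

-- ===== CLAIM (what is proved, stated in full; the proofs are below) =====
def Claim_equal_calculate_payroll : Prop := ∀ (ranks : List String), Dom_calculate_payroll ranks → Spec_calculate_payroll ranks (calculate_payroll ranks)

-- ===== LEMMAS AND PROOFS =====

-- the salary of one rank (A's elif chain as a value)
def pvSal (r : String) : Int :=
  if r = "Commodore" ∨ r = "Rear Admiral" ∨ r = "Vice Admiral" then 2000
  else if r = "Commander" ∨ r = "Captain" then 1000
  else if r = "Ensign" ∨ r = "Lieutenant" then 500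
  else if r = "Crewman Third Class" ∨ r = "Crewman Second Class" ∨ r = "Crewman First Class" then 200
  else 0

lemma calcA_eq_sum (ranks : List String) :
    calculate_payroll ranks = (ranks.map pvSal).sum := by
  have key : calculate_payroll ranks = ranks.foldl
      (fun (payroll : Int) (r : String) =>
        if r = "Commodore" ∨ r = "Rear Admiral" ∨ r = "Vice Admiral" then payroll + 2000
        else if r = "Commander" ∨ r = "Captain" then payroll + 1000
        else if r = "Ensign" ∨ r = "Lieutenant" then payroll + 500
        else if r = "Crewman Third Class" ∨ r = "Crewman Second Class" ∨ r = "Crewman First Class" then payroll + 200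
        else payroll) 0 :=
    PySem.List.foldl_pyRange_pyGetD (xs := ranks) (d := "") (init := (0 : Int))
      (f := fun payroll r =>
        if r = "Commodore" ∨ r = "Rear Admiral" ∨ r = "Vice Admiral" then payroll + 2000
        else if r = "Commander" ∨ r = "Captain" then payroll + 1000
        else if r = "Ensign" ∨ r = "Lieutenant" then payroll + 500
        else if r = "Crewman Third Class" ∨ r = "Crewman Second Class" ∨ r = "Crewman First Class" then payroll + 200
        else payroll) (a := 0) (by norm_num)
  have h : (fun (payroll : Int) (r : String) =>
      if r = "Commodore" ∨ r = "Rear Admiral" ∨ r = "Vice Admiral" then payroll + 2000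
      else if r = "Commander" ∨ r = "Captain" then payroll + 1000
      else if r = "Ensign" ∨ r = "Lieutenant" then payroll + 500
      else if r = "Crewman Third Class" ∨ r = "Crewman Second Class" ∨ r = "Crewman First Class" then payroll + 200
      else payroll) = fun payroll r => payroll + pvSal r := by
    funext p r; unfold pvSal; split_ifs <;> ring
  rw [key, h, PySem.List.foldl_add]; ring

lemma pvSalaries_items :
    pvSalaries.items =
      [("Commodore", (2000 : Int)), ("Rear Admiral", 2000), ("Vice Admiral", 2000),
       ("Commander", 1000), ("Captain", 1000),
       ("Ensign", 500), ("Lieutenant", 500),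
       ("Crewman Third Class", 200), ("Crewman Second Class", 200), ("Crewman First Class", 200)] := by
  rfl

lemma pvSal_eq_indicators (x : String) :
    pvSal x =
      2000 * (if x == "Commodore" then (1 : Int) else 0) +
      2000 * (if x == "Rear Admiral" then (1 : Int) else 0) +
      2000 * (if x == "Vice Admiral" then (1 : Int) else 0) +
      1000 * (if x == "Commander" then (1 : Int) else 0) +
      1000 * (if x == "Captain" then (1 : Int) else 0) +
      500 * (if x == "Ensign" then (1 : Int) else 0) +
      500 * (if x == "Lieutenant" then (1 : Int) else 0) +
      200 * (if x == "Crewman Third Class" then (1 : Int) else 0) +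
      200 * (if x == "Crewman Second Class" then (1 : Int) else 0) +
      200 * (if x == "Crewman First Class" then (1 : Int) else 0) := by
  by_cases h1 : x = "Commodore"
  · subst h1; decide
  by_cases h2 : x = "Rear Admiral"
  · subst h2; decide
  by_cases h3 : x = "Vice Admiral"
  · subst h3; decide
  by_cases h4 : x = "Commander"
  · subst h4; decide
  by_cases h5 : x = "Captain"
  · subst h5; decide
  by_cases h6 : x = "Ensign"
  · subst h6; decide
  by_cases h7 : x = "Lieutenant"
  · subst h7; decide
  by_cases h8 : x = "Crewman Third Class"
  · subst h8; decide
  by_cases h9 : x = "Crewman Second Class"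
  · subst h9; decide
  by_cases h10 : x = "Crewman First Class"
  · subst h10; decide
  · simp [pvSal, beq_iff_eq, h1, h2, h3, h4, h5, h6, h7, h8, h9, h10]

lemma sum_table_eq_sum_sal (xs : List String) :
    (([("Commodore", (2000 : Int)), ("Rear Admiral", 2000), ("Vice Admiral", 2000),
       ("Commander", 1000), ("Captain", 1000), ("Ensign", 500), ("Lieutenant", 500),
       ("Crewman Third Class", 200), ("Crewman Second Class", 200),
       ("Crewman First Class", 200)].map
        (fun p => p.2 * (xs.count p.1 : Int))).sum) = (xs.map pvSal).sum := by
  induction xs with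
  | nil => simp
  | cons x xs ih =>
      simp only [List.map_cons, List.map_nil, List.sum_cons, List.sum_nil, List.count_cons] at ih ⊢
      rw [← ih, pvSal_eq_indicators]
      push_cast
      ring

lemma calcB_eq_sum (ranks : List String) :
    calculate_payroll_alt ranks = (ranks.map pvSal).sum := by
  unfold calculate_payroll_alt
  rw [pvSalaries_items]
  simp only [PySem.Dict.foldl_insert_getD_add_one_eq_counter, PySem.Dict.getD_counter]
  exact sum_table_eq_sum_sal ranks

-- ===== VERDICT (by name: the statement is the Claim_ definition above) =====
theorem calculate_payroll_spec : Claim_equal_calculate_payroll := by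
  intro ranks _
  unfold Spec_calculate_payroll
  rw [calcA_eq_sum, calcB_eq_sum]
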